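-- pv_equiv track=rewrite | github.com/max-ayres/Quantitative-Research-Virtual-Work-Experience | taskone.py | findDate
-- ===== SOURCE A (Python) =====
-- def findDate(month, day, year):
--     find = 0
--     for i in range(year - 2021):
--         find += 12
--     for i in range(month):
--         find += 1
--     if year == 2020:
--         if month == 10:
--             find = 0
--         elif month == 11:
--             find = 1
--         else:
--             month == 12
--     return find
-- ===== SOURCE B (Python) =====
-- def findDate(month, day, year):
--     find = max(year - 2021, 0) * 12 + max(month, 0)
--     if year == 2020:
--         if month == 10:
--             find = 0
--         elif month == 11:
--             find = 1
--     return find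
-- ===== Notes on version B (the rewrite author's own statement) =====
-- stated objective: simpler
-- what changed: Replaces both accumulation loops with a closed-form arithmetic expression (clamped at 0 to match range()'s empty behaviour), keeping the year-2020 override; the dead 'month == 12' no-op line is dropped.
import Mathlib
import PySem

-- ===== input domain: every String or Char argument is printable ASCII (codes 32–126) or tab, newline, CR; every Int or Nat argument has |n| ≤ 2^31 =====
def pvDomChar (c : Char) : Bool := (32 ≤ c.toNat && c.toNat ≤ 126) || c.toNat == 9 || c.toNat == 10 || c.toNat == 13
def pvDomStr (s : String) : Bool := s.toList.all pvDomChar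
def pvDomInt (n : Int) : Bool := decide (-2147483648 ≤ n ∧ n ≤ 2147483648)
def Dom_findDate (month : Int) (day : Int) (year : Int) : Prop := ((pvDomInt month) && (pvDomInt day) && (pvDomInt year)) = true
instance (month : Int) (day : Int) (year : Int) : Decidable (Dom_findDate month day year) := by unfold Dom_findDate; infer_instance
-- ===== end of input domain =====

-- B replaces the two accumulation loops by a closed-form arithmetic expression (simpler, O(1)).

-- ===== PORT A =====
def findDate (month : Int) (day : Int) (year : Int) : Int :=
  let find : Int := 0
  let find := (PySem.List.pyRange 0 (year - 2021) 1).foldl (fun f _ => f + 12) find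
  let find := (PySem.List.pyRange 0 month 1).foldl (fun f _ => f + 1) find
  if year = 2020 then
    if month = 10 then 0
    else if month = 11 then 1
    else find  -- original's 'month == 12' line is a no-op expression statement
  else find

-- ===== PORT B =====
def findDate_alt (month : Int) (day : Int) (year : Int) : Int :=
  let find := max (year - 2021) 0 * 12 + max month 0
  if year = 2020 then
    if month = 10 then 0
    else if month = 11 then 1
    else find
  else find

-- ===== PRECONDITION & SPEC =====
def Spec_findDate (month : Int) (day : Int) (year : Int) (out : Int) : Prop := out = findDate_alt month day year
instance (month : Int) (day : Int) (year : Int) (out : Int) : Decidable (Spec_findDate month day year out) := by unfold Spec_findDate; infer_instance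

-- ===== CLAIM (what is proved, stated in full; the proofs are below) =====
def Claim_equal_findDate : Prop := ∀ (month : Int) (day : Int) (year : Int), Dom_findDate month day year → Spec_findDate month day year (findDate month day year)

-- ===== LEMMAS AND PROOFS =====
theorem pv_foldl_const_add (l : List Int) (a c : Int) :
    l.foldl (fun f _ => f + c) a = a + l.length * c := by
  induction l generalizing a with
  | nil => simp
  | cons x xs ih => simp [List.foldl, ih]; ring

-- ===== VERDICT (by name: the statement is the Claim_ definition above) =====
theorem findDate_spec : Claim_equal_findDate := by
  intro month day year _
  unfold Spec_findDate findDate findDate_alt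
  simp only [pv_foldl_const_add, PySem.List.length_pyRange_one]
  have h1 : ((year - 2021 - 0).toNat : Int) = max (year - 2021) 0 := by omega
  have h2 : ((month - 0).toNat : Int) = max month 0 := by omega
  rw [h1, h2]
  ring_nf
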